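-- pv_equiv track=rewrite | github.com/MarcoSeri/MarcoSeri | src/practica3.py | encuentra_ciclo
-- ===== SOURCE A (Python) =====
-- def encuentra_ciclo(grafo_lista, nodo):
--     vertices, aristas = grafo_lista
--
--     def dfs(actual, visitados, camino):
--         visitados.add(actual)
--         camino.append(actual)
--         for inicio, fin in aristas:
--             if  len(camino) >= 3 and inicio == actual:
--                 return camino + [fin]
--             if  len(camino) >= 3 and fin == actual:
--                 return camino + [inicio]
--             if inicio == actual and fin not in visitados:
--                 resultado = dfs(fin, visitados, camino)
--                 if resultado:
--                     return resultado
--             elif fin == actual and inicio not in visitados: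
--                 resultado = dfs(inicio, visitados, camino)
--                 if resultado:
--                     return resultado
--
--         camino.pop()
--         return []
--
--     return dfs(nodo, set(), [])
--     '''
--     Ejemplo Entrada:
--         (['a','b','c','d','e','f'],[('a','b'),('a','d'),('b','d'),('b','c'),('c','d'),('c','e'),('d','e'),('c','f')])
-- 	d
--     Ejemplo retorno:
--         ['a','b','c','d','a']
--     '''
--     pass
-- ===== SOURCE B (Python) =====
-- def encuentra_ciclo(grafo_lista, nodo):
--     vertices, aristas = grafo_lista
--     adj = {}
--     for u, v in aristas:
--         adj.setdefault(u, []).append(v)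
--         adj.setdefault(v, []).append(u)
--
--     visitados = set()
--     camino = []
--
--     def dfs(actual):
--         visitados.add(actual)
--         camino.append(actual)
--         vecinos = adj.get(actual, [])
--         if len(camino) >= 3 and vecinos:
--             return camino + [vecinos[0]]
--         for w in vecinos:
--             if w not in visitados:
--                 resultado = dfs(w)
--                 if resultado:
--                     return resultado
--         camino.pop()
--         return []
--
--     return dfs(nodo)
-- ===== Notes on version B (the rewrite author's own statement) =====
-- stated objective: alternative
-- what changed: B precomputes an adjacency list (incident edges in original order) once and DFS-recurses only over each node's neighbours, replacing A's rescan of the whole edge list at every DFS step; the per-edge length>=3 early exit becomes a single head-of-neighbour-list lookup.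
import Mathlib
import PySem

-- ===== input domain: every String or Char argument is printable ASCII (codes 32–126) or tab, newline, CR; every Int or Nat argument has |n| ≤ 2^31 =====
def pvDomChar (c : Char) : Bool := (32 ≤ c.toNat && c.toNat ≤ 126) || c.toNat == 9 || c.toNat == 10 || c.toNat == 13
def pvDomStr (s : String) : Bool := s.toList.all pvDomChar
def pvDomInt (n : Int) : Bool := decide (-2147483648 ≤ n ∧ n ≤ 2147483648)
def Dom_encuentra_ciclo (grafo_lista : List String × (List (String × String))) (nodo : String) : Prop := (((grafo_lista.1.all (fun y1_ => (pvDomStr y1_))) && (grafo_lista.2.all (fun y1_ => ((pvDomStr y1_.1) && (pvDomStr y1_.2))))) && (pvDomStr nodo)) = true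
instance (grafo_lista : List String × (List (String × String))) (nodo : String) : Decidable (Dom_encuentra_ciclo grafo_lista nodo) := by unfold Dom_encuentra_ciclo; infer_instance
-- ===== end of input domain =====

-- B precomputes an adjacency list once and DFS-recurses over each node's neighbours
-- only, instead of A's rescan of the whole edge list at every DFS step (alternative
-- structure; not measured faster on the timing inputs).

-- ===== PORT A =====
-- A's dfs: the mutable set 'visitados' (grows monotonically, shared across backtracking)
-- and the list 'camino' (restored by camino.pop() on failure) are threaded as values;
-- each call returns (the returned list, the updated visitados).
-- The fuel 2*|aristas|+2 is never exhausted: every recursive call adds a previously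
-- unvisited node to visitados and only unvisited edge endpoints are recursed into,
-- so the depth is at most (number of distinct endpoints)+1 ≤ 2*|aristas|+1.
mutual
def dfsA (aristas : List (String × String)) : Nat → String → PySem.Set String → List String → List String × PySem.Set String
  | 0, _, vis, _ => ([], vis)
  | Nat.succ fuel, actual, vis, cam =>
    loopA aristas fuel actual aristas (PySem.Set.add vis actual) (cam ++ [actual])
termination_by fuel _ _ _ => (fuel, 0)

def loopA (aristas : List (String × String)) (fuel : Nat) (actual : String) :
    List (String × String) → PySem.Set String → List String → List String × PySem.Set String
  | [], vis, _ => ([], vis)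
  | (i, f) :: rest, vis, cam =>
    if 3 ≤ cam.length ∧ i = actual then (cam ++ [f], vis)
    else if 3 ≤ cam.length ∧ f = actual then (cam ++ [i], vis)
    else if i = actual ∧ ¬ PySem.Set.contains vis f then
      let r := dfsA aristas fuel f vis cam
      if r.1 ≠ [] then r else loopA aristas fuel actual rest r.2 cam
    else if f = actual ∧ ¬ PySem.Set.contains vis i then
      let r := dfsA aristas fuel i vis cam
      if r.1 ≠ [] then r else loopA aristas fuel actual rest r.2 cam
    else loopA aristas fuel actual rest vis cam
termination_by es _ _ => (fuel, es.length + 1)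
end

def encuentra_ciclo (grafo_lista : List String × (List (String × String))) (nodo : String) : List String :=
  let aristas := grafo_lista.2
  (dfsA aristas (2 * aristas.length + 2) nodo PySem.Set.empty []).1

-- ===== PORT B =====
-- adj.setdefault(u, []).append(v) updates the value in place; the key's position is
-- never used (adj is only read with .get), so insert with the extended list is exact.
def buildAdj (aristas : List (String × String)) : PySem.Dict String (List String) :=
  aristas.foldl
    (fun d p =>
      let d1 := d.insert p.1 (d.getD p.1 [] ++ [p.2])
      d1.insert p.2 (d1.getD p.2 [] ++ [p.1]))
    PySem.Dict.empty

mutual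
def dfsB (adj : PySem.Dict String (List String)) : Nat → String → PySem.Set String → List String → List String × PySem.Set String
  | 0, _, vis, _ => ([], vis)
  | Nat.succ fuel, actual, vis, cam =>
    let vis1 := PySem.Set.add vis actual
    let cam1 := cam ++ [actual]
    let vecinos := adj.getD actual []
    if 3 ≤ cam1.length ∧ vecinos ≠ [] then (cam1 ++ [vecinos.headI], vis1)
    else loopB adj fuel vecinos vis1 cam1
termination_by fuel _ _ _ => (fuel, 0)

def loopB (adj : PySem.Dict String (List String)) (fuel : Nat) :
    List String → PySem.Set String → List String → List String × PySem.Set String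
  | [], vis, _ => ([], vis)
  | w :: ws, vis, cam =>
    if ¬ PySem.Set.contains vis w then
      let r := dfsB adj fuel w vis cam
      if r.1 ≠ [] then r else loopB adj fuel ws r.2 cam
    else loopB adj fuel ws vis cam
termination_by ws _ _ => (fuel, ws.length + 1)
end

def encuentra_ciclo_alt (grafo_lista : List String × (List (String × String))) (nodo : String) : List String :=
  let aristas := grafo_lista.2
  (dfsB (buildAdj aristas) (2 * aristas.length + 2) nodo PySem.Set.empty []).1

-- ===== PRECONDITION & SPEC =====
def Spec_encuentra_ciclo (grafo_lista : List String × (List (String × String))) (nodo : String) (out : List String) : Prop := out = encuentra_ciclo_alt grafo_lista nodo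
instance (grafo_lista : List String × (List (String × String))) (nodo : String) (out : List String) : Decidable (Spec_encuentra_ciclo grafo_lista nodo out) := by unfold Spec_encuentra_ciclo; infer_instance

-- ===== CLAIM (what is proved, stated in full; the proofs are below) =====
def Claim_equal_encuentra_ciclo : Prop := ∀ (grafo_lista : List String × (List (String × String))) (nodo : String), Dom_encuentra_ciclo grafo_lista nodo → Spec_encuentra_ciclo grafo_lista nodo (encuentra_ciclo grafo_lista nodo)

-- ===== LEMMAS AND PROOFS =====

-- The neighbour list that A's per-node edge scan effectively walks, edge by edge.
def nbrs (es : List (String × String)) (x : String) : List String :=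
  es.flatMap (fun p => (if p.1 = x then [p.2] else []) ++ (if p.2 = x then [p.1] else []))

theorem buildAdj_getD_aux (x : String) (es : List (String × String)) :
    ∀ d : PySem.Dict String (List String),
      (es.foldl (fun d p =>
        let d1 := d.insert p.1 (d.getD p.1 [] ++ [p.2])
        d1.insert p.2 (d1.getD p.2 [] ++ [p.1])) d).getD x [] = d.getD x [] ++ nbrs es x := by
  induction es with
  | nil => intro d; simp [nbrs]
  | cons p rest ih =>
    intro d
    obtain ⟨u, v⟩ := p
    simp only [List.foldl_cons]
    rw [ih]
    simp only [nbrs, List.flatMap_cons]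
    by_cases hu : x = u
    · subst hu
      by_cases hv : x = v
      · subst hv
        simp
      · have hvx : ¬ v = x := fun h => hv h.symm
        simp [PySem.Dict.getD_insert, hv, hvx]
    · have hux : ¬ u = x := fun h => hu h.symm
      by_cases hv : x = v
      · subst hv
        simp [PySem.Dict.getD_insert, hu, hux]
      · have hvx : ¬ v = x := fun h => hv h.symm
        simp [PySem.Dict.getD_insert, hu, hux, hv, hvx]

theorem buildAdj_getD (aristas : List (String × String)) (x : String) :
    (buildAdj aristas).getD x [] = nbrs aristas x := by
  unfold buildAdj
  rw [buildAdj_getD_aux]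
  simp

-- visitados only grows through dfsB / loopB.
theorem mono_B (adj : PySem.Dict String (List String)) :
    ∀ fuel : Nat,
      (∀ w vis cam x, PySem.Set.contains vis x = true →
        PySem.Set.contains (dfsB adj fuel w vis cam).2 x = true) ∧
      (∀ ws vis cam x, PySem.Set.contains vis x = true →
        PySem.Set.contains (loopB adj fuel ws vis cam).2 x = true) := by
  intro fuel
  induction fuel with
  | zero =>
    have hd : ∀ w vis cam x, PySem.Set.contains vis x = true →
        PySem.Set.contains (dfsB adj 0 w vis cam).2 x = true := by
      intro w vis cam x h; simpa [dfsB] using h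
    refine ⟨hd, ?_⟩
    intro ws
    induction ws with
    | nil => intro vis cam x h; simpa [loopB] using h
    | cons w ws ihw =>
      intro vis cam x h
      simp only [loopB]
      split_ifs with hv hr
      · exact ihw _ _ _ h
      · exact hd _ _ _ _ h
      · exact ihw _ _ _ (hd _ _ _ _ h)
  | succ fuel ih =>
    have hd : ∀ w vis cam x, PySem.Set.contains vis x = true →
        PySem.Set.contains (dfsB adj (fuel + 1) w vis cam).2 x = true := by
      intro w vis cam x h
      have h1 : PySem.Set.contains (PySem.Set.add vis w) x = true := by
        rw [PySem.Set.contains_iff] at h ⊢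
        exact (PySem.Set.mem_add _ _ _).2 (Or.inl h)
      simp only [dfsB]
      split_ifs with hc
      · simpa using h1
      · exact ih.2 _ _ _ _ h1
    refine ⟨hd, ?_⟩
    intro ws
    induction ws with
    | nil => intro vis cam x h; simpa [loopB] using h
    | cons w ws ihw =>
      intro vis cam x h
      simp only [loopB]
      split_ifs with hv hr
      · exact ihw _ _ _ h
      · exact hd _ _ _ _ h
      · exact ihw _ _ _ (hd _ _ _ _ h)

-- length ≥ 3 case: A's scan returns the path extended by the first neighbour (or fails).
theorem loopA_ge3 (aristas : List (String × String)) (fuel : Nat) (actual : String)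
    (cam : List String) (h3 : 3 ≤ cam.length) :
    ∀ (es : List (String × String)) (vis : PySem.Set String),
      loopA aristas fuel actual es vis cam =
        match nbrs es actual with
        | [] => ([], vis)
        | w :: _ => (cam ++ [w], vis) := by
  intro es
  induction es with
  | nil => intro vis; simp [loopA, nbrs]
  | cons p rest ih =>
    intro vis
    obtain ⟨i, f⟩ := p
    simp only [loopA, nbrs, List.flatMap_cons]
    by_cases hi : i = actual
    · simp [hi, h3]
    · by_cases hf : f = actual
      · simp [hi, hf, h3]
      · simp only [nbrs] at ih
        simp [hi, hf, ih]

theorem main_equiv (aristas : List (String × String)) :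
    ∀ (fuel : Nat) (actual : String) (vis : PySem.Set String) (cam : List String),
      dfsA aristas fuel actual vis cam = dfsB (buildAdj aristas) fuel actual vis cam := by
  intro fuel
  induction fuel with
  | zero => intro actual vis cam; simp [dfsA, dfsB]
  | succ fuel ih =>
    intro actual vis cam
    simp only [dfsA, dfsB, buildAdj_getD]
    by_cases h3 : 3 ≤ (cam ++ [actual]).length
    · rw [loopA_ge3 aristas fuel actual (cam ++ [actual]) h3]
      cases hnb : nbrs aristas actual with
      | nil => simp [loopB]
      | cons w ws =>
        split_ifs with hc
        · simp
        · exact absurd ⟨h3, by simp⟩ hc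
    · rw [if_neg (fun hc => h3 hc.1)]
      have hmem : PySem.Set.contains (PySem.Set.add vis actual) actual = true := by
        rw [PySem.Set.contains_iff]
        exact (PySem.Set.mem_add _ _ _).2 (Or.inr rfl)
      have key : ∀ (es : List (String × String)) (v : PySem.Set String),
          PySem.Set.contains v actual = true →
          loopA aristas fuel actual es v (cam ++ [actual]) =
            loopB (buildAdj aristas) fuel (nbrs es actual) v (cam ++ [actual]) := by
        intro es
        induction es with
        | nil => intro v _; simp [loopA, loopB, nbrs]
        | cons p rest ihe =>
          intro v hv
          obtain ⟨i, f⟩ := p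
          simp only [loopA, nbrs, List.flatMap_cons]
          rw [if_neg (fun hc => h3 hc.1), if_neg (fun hc => h3 hc.1)]
          simp only [nbrs] at ihe
          by_cases hi : i = actual
          · by_cases hvf : PySem.Set.contains v f = true
            · -- f already visited: A skips the edge, B skips the neighbour(s)
              have hvi : PySem.Set.contains v i = true := by rw [hi]; exact hv
              rw [if_neg (fun hc => hc.2 hvf), if_neg (fun hc => hc.2 hvi)]
              by_cases hf : f = actual
              · -- self loop: both copies visited
                rw [if_pos hi, if_pos hf]
                simp only [List.cons_append, List.nil_append]
                simp only [loopB]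
                rw [if_neg (not_not_intro hvf), if_neg (not_not_intro hvi)]
                exact ihe v hv
              · rw [if_pos hi, if_neg hf]
                simp only [List.cons_append, List.nil_append]
                simp only [loopB]
                rw [if_neg (not_not_intro hvf)]
                exact ihe v hv
            · -- recurse into f on both sides
              have hf : ¬ f = actual := fun h => hvf (by rw [h]; exact hv)
              rw [if_pos ⟨hi, hvf⟩, if_pos hi, if_neg hf]
              simp only [List.cons_append, List.nil_append]
              simp only [loopB]
              rw [if_pos hvf, ih]
              split_ifs with hr
              · rfl
              · exact ihe _ ((mono_B (buildAdj aristas) fuel).1 _ _ _ _ hv)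
          · rw [if_neg (fun hc => hi hc.1), if_neg hi]
            by_cases hf : f = actual
            · by_cases hvi : PySem.Set.contains v i = true
              · rw [if_neg (fun hc => hc.2 hvi), if_pos hf]
                simp only [List.cons_append, List.nil_append]
                simp only [loopB]
                rw [if_neg (not_not_intro hvi)]
                exact ihe v hv
              · rw [if_pos ⟨hf, hvi⟩, if_pos hf]
                simp only [List.cons_append, List.nil_append]
                simp only [loopB]
                rw [if_pos hvi, ih]
                split_ifs with hr
                · rfl
                · exact ihe _ ((mono_B (buildAdj aristas) fuel).1 _ _ _ _ hv)
            · rw [if_neg (fun hc => hf hc.1), if_neg hf]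
              simp only [List.nil_append]
              exact ihe v hv
      exact key aristas (PySem.Set.add vis actual) hmem

-- ===== VERDICT (by name: the statement is the Claim_ definition above) =====
theorem encuentra_ciclo_spec : Claim_equal_encuentra_ciclo := by
  intro gl nodo _
  unfold Spec_encuentra_ciclo encuentra_ciclo encuentra_ciclo_alt
  simp only [main_equiv]
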